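-- pv_equiv track=rewrite | github.com/Owczany/Semestr-6 | sztuczna_inteligencja/pracownia/lista_1/zadanie_5.py | compute_col_costs
-- ===== SOURCE A (Python) =====
-- from typing import List, Tuple
--
-- def opt_dist(bits: List[int], D: int) -> int:
--     """
--     Minimalna liczba flipów, aby uzyskać:
--     - D>0: jeden spójny blok 1 długości D, poza blokiem same 0
--     - D=0: same 0
--     """
--     n = len(bits)
--     if D == 0:
--         return sum(bits)
--     if D > n:
--         # Sprzeczna specyfikacja - nie powinna wystąpić w testach.
--         return 10**9
--
--     # pref[i] = liczba jedynek w bits[0:i]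
--     pref = [0] * (n + 1)
--     for i in range(n):
--         pref[i + 1] = pref[i] + bits[i]
--     ones_total = pref[n]
--
--     best = 10**18
--     for start in range(0, n - D + 1):
--         end = start + D
--         ones_in = pref[end] - pref[start]
--         # cost = zeros_in_window + ones_outside
--         cost = (D - ones_in) + (ones_total - ones_in)
--         if cost < best:
--             best = cost
--
--     return int(best)
--
-- def compute_col_costs(grid: List[List[int]], col_desc: List[int]) -> List[int]:
--     """Liczy koszt każdej kolumny niezależnie."""
--     X = len(grid)
--     Y = len(grid[0])
--     costs = []
--     for j in range(Y):
--         col_bits = [grid[i][j] for i in range(X)]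
--         costs.append(opt_dist(col_bits, col_desc[j]))
--     return costs
-- ===== SOURCE B (Python) =====
-- from typing import List
--
--
-- def _opt(bits: List[int], D: int) -> int:
--     """One pass over the elements: cost of a window = D + total - 2*window_sum,
--     so keep a running window sum and minimize the closed-form cost on the fly."""
--     n = len(bits)
--     if D == 0:
--         return sum(bits)
--     if D > n:
--         return 10**9
--     total = sum(bits)
--     best = 10**18  # infinity
--     win = 0
--     for k in range(n):
--         win += bits[k]
--         if k >= D:
--             win -= bits[k - D]
--         if k + 1 >= D:
--             cost = D + total - 2 * win
--             if cost < best: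
--                 best = cost
--     return best
--
--
-- def compute_col_costs(grid: List[List[int]], col_desc: List[int]) -> List[int]:
--     width = len(grid[0])
--     return [_opt([row[j] for row in grid], col_desc[j]) for j in range(width)]
-- ===== Notes on version B (the rewrite author's own statement) =====
-- stated objective: simpler
-- what changed: opt_dist's prefix-sum array plus a second loop over window starts is replaced by one pass over the elements that maintains a running window sum and minimizes the closed-form cost D + total - 2*window_sum on the fly, so no auxiliary array and no per-start prefix arithmetic.
import Mathlib
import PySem

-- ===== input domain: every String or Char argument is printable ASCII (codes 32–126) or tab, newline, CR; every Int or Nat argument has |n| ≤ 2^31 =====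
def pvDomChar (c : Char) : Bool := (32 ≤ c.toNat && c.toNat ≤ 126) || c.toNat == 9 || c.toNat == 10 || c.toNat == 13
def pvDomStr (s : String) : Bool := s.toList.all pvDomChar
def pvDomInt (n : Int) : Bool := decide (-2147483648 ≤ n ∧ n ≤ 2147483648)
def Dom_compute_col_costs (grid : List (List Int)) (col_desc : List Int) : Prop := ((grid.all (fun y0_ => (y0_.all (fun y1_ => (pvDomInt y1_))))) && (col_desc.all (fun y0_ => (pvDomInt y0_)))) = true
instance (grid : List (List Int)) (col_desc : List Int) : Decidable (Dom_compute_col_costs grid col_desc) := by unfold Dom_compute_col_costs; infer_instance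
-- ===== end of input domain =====

-- B replaces opt_dist's prefix-sum array plus second loop over window starts by one pass over
-- the elements maintaining a running window sum and minimizing the closed-form cost
-- D + total - 2*window_sum on the fly (objective: simpler, O(1) extra space per column).

-- ===== PORT A =====
def optDist (bits : List Int) (D : Int) : Int :=
  let n : Int := bits.length
  if D = 0 then bits.sum
  else if D > n then 10 ^ 9
  else
    let pref : List Int := bits.foldl (fun p b => p ++ [p.getLast! + b]) [0]
    let ones_total := PySem.List.pyGetD pref n 0
    (PySem.List.pyRange 0 (n - D + 1) 1).foldl
      (fun best start =>
        let ones_in := PySem.List.pyGetD pref (start + D) 0 - PySem.List.pyGetD pref start 0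
        let cost := (D - ones_in) + (ones_total - ones_in)
        if cost < best then cost else best)
      (10 ^ 18)

def compute_col_costs (grid : List (List Int)) (col_desc : List Int) : List Int :=
  let X : Int := grid.length
  let Y : Int := (PySem.List.pyGetD grid 0 []).length
  (PySem.List.pyRange 0 Y 1).foldl
    (fun costs j =>
      let col_bits := (PySem.List.pyRange 0 X 1).map
        (fun i => PySem.List.pyGetD (PySem.List.pyGetD grid i []) j 0)
      costs ++ [optDist col_bits (PySem.List.pyGetD col_desc j 0)])
    []

-- ===== PORT B =====
def optAlt (bits : List Int) (D : Int) : Int :=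
  let n : Int := bits.length
  if D = 0 then bits.sum
  else if D > n then 10 ^ 9
  else
    let total := bits.sum
    let st := (PySem.List.pyRange 0 n 1).foldl
      (fun (p : Int × Int) k =>
        let win1 := p.1 + PySem.List.pyGetD bits k 0
        let win := if D ≤ k then win1 - PySem.List.pyGetD bits (k - D) 0 else win1
        let best :=
          if D ≤ k + 1 then
            let cost := D + total - 2 * win
            if cost < p.2 then cost else p.2
          else p.2
        (win, best))
      (0, 10 ^ 18)
    st.2

def compute_col_costs_alt (grid : List (List Int)) (col_desc : List Int) : List Int :=
  let width : Int := (PySem.List.pyGetD grid 0 []).length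
  (PySem.List.pyRange 0 width 1).map
    (fun j => optAlt (grid.map (fun row => PySem.List.pyGetD row j 0))
                     (PySem.List.pyGetD col_desc j 0))

-- ===== PRECONDITION & SPEC =====
-- Pre_ excludes exactly the inputs on which A raises IndexError: the empty grid (grid[0]),
-- a row or col_desc shorter than the first row, and a negative block length among the used
-- entries of col_desc (its start loop then runs past the end of the prefix array).
def Pre_compute_col_costs (grid : List (List Int)) (col_desc : List Int) : Prop :=
  grid ≠ [] ∧
  (∀ row ∈ grid, (grid.headD []).length ≤ row.length) ∧
  (grid.headD []).length ≤ col_desc.length ∧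
  (∀ j < (grid.headD []).length, 0 ≤ col_desc.getD j 0)
instance (grid : List (List Int)) (col_desc : List Int) : Decidable (Pre_compute_col_costs grid col_desc) := by
  unfold Pre_compute_col_costs; infer_instance

def pvWitness_compute_col_costs : List (List Int) × List Int := ([[1, 0], [0, 1]], [1, 2])

def Spec_compute_col_costs (grid : List (List Int)) (col_desc : List Int) (out : List Int) : Prop := out = compute_col_costs_alt grid col_desc
instance (grid : List (List Int)) (col_desc : List Int) (out : List Int) : Decidable (Spec_compute_col_costs grid col_desc out) := by unfold Spec_compute_col_costs; infer_instance

-- ===== CLAIM (what is proved, stated in full; the proofs are below) =====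
def Claim_equal_compute_col_costs : Prop := ∀ (grid : List (List Int)) (col_desc : List Int), Dom_compute_col_costs grid col_desc → Pre_compute_col_costs grid col_desc → Spec_compute_col_costs grid col_desc (compute_col_costs grid col_desc)

-- ===== LEMMAS AND PROOFS =====

theorem getLast!_append_singleton (l : List Int) (a : Int) : (l ++ [a]).getLast! = a := by
  cases l with
  | nil => rfl
  | cons x xs => simp [List.getLast!]

theorem pref_spec (bits : List Int) :
    bits.foldl (fun p b => p ++ [p.getLast! + b]) [0]
      = (List.range (bits.length + 1)).map (fun i => (bits.take i).sum) := by
  induction bits using List.reverseRecOn with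
  | nil => simp
  | append_singleton bs b ih =>
    rw [List.foldl_append, ih]
    simp only [List.foldl_cons, List.foldl_nil]
    have hlast : ((List.range (bs.length + 1)).map (fun i => (bs.take i).sum)).getLast! = bs.sum := by
      rw [List.range_succ, List.map_append, List.map_cons, List.map_nil,
          getLast!_append_singleton, List.take_length]
    rw [hlast]
    have hlen : (bs ++ [b]).length + 1 = (bs.length + 1) + 1 := by simp
    have htake : (bs ++ [b]).take (bs.length + 1) = bs ++ [b] := by
      have h : bs.length + 1 = (bs ++ [b]).length := by simp
      rw [h, List.take_length]
    have hmap : (List.range (bs.length + 1)).map (fun i => (bs.take i).sum)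
        = (List.range (bs.length + 1)).map (fun i => ((bs ++ [b]).take i).sum) := by
      apply List.map_congr_left
      intro i hi
      rw [List.take_append_of_le_length (by exact Nat.le_of_lt_succ (List.mem_range.mp hi))]
    have hr : (List.range ((bs.length + 1) + 1)).map (fun i => ((bs ++ [b]).take i).sum)
        = (List.range (bs.length + 1)).map (fun i => ((bs ++ [b]).take i).sum)
          ++ [((bs ++ [b]).take (bs.length + 1)).sum] := by
      rw [List.range_succ, List.map_append, List.map_cons, List.map_nil]
    rw [hlen, hr, ← hmap, htake]
    simp

theorem getS (bits : List Int) (i : Nat) (h : i ≤ bits.length) :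
    PySem.List.pyGetD ((List.range (bits.length + 1)).map (fun i => (bits.take i).sum)) (i : Int) 0
      = (bits.take i).sum := by
  rw [PySem.List.pyGetD_natCast, List.getD_eq_getElem?_getD]
  simp [Nat.lt_succ_of_le h]

theorem take_succ_sum (l : List Int) (i : Nat) (h : i < l.length) :
    (l.take (i + 1)).sum = (l.take i).sum + l.getD i 0 := by
  rw [List.take_add_one]
  simp [List.getD_eq_getElem?_getD, h]

-- the invariant of B's single pass: state after m steps = (current window sum, min cost so far)
theorem bfold_inv (bits : List Int) (C : Int) (Dn : Nat) (hD : 0 < Dn)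
    (m : Nat) (hm : m ≤ bits.length) :
    (List.range m).foldl
      (fun (p : Int × Int) (k : Nat) =>
        let win1 := p.1 + bits.getD k 0
        let win := if Dn ≤ k then win1 - bits.getD (k - Dn) 0 else win1
        let best :=
          if Dn ≤ k + 1 then
            let cost := C - 2 * win
            if cost < p.2 then cost else p.2
          else p.2
        (win, best)) (0, 10 ^ 18)
    = ((bits.take m).sum - (bits.take (m - Dn)).sum,
       (List.range (m + 1 - Dn)).foldl
         (fun best s =>
           if C - 2 * ((bits.take (s + Dn)).sum - (bits.take s).sum) < best
           then C - 2 * ((bits.take (s + Dn)).sum - (bits.take s).sum) else best)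
         (10 ^ 18)) := by
  induction m with
  | zero => simp [Nat.sub_eq_zero_of_le hD]
  | succ m ih =>
    rw [List.range_succ, List.foldl_append, ih (by omega)]
    simp only [List.foldl_cons, List.foldl_nil]
    have hmlt : m < bits.length := by omega
    have htk := take_succ_sum bits m hmlt
    by_cases hkD : Dn ≤ m
    · -- window is full and slides
      have htk2 := take_succ_sum bits (m - Dn) (by omega)
      have e1 : m - Dn + 1 = m + 1 - Dn := by omega
      rw [e1] at htk2
      have e2 : m + 1 + 1 - Dn = (m + 1 - Dn) + 1 := by omega
      have e3 : (m + 1 - Dn) + Dn = m + 1 := by omega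
      simp only [if_pos hkD, if_pos (show Dn ≤ m + 1 by omega)]
      rw [e2, List.range_succ, List.foldl_append]
      simp only [List.foldl_cons, List.foldl_nil, e3, Prod.mk.injEq]
      constructor
      · omega
      · split_ifs <;> omega
    · -- window still filling up
      have hm0 : m - Dn = 0 := by omega
      by_cases hkD1 : Dn ≤ m + 1
      · -- Dn = m + 1: the first full window closes now
        have hDn : Dn = m + 1 := by omega
        have e4 : m + 1 + 1 - Dn = 1 := by omega
        have e5 : m + 1 - Dn = 0 := by omega
        simp only [if_neg hkD, if_pos hkD1, hm0, e4, e5, List.range_one,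
          List.range_zero, List.foldl_cons, List.foldl_nil, List.take_zero,
          List.sum_nil, sub_zero, Nat.zero_add, Prod.mk.injEq]
        rw [hDn]
        constructor
        · omega
        · split_ifs <;> omega
      · have e4 : m + 1 + 1 - Dn = 0 := by omega
        have e5 : m + 1 - Dn = 0 := by omega
        simp only [if_neg hkD, if_neg hkD1, hm0, e4, e5, List.take_zero,
          List.sum_nil, sub_zero, List.range_zero, List.foldl_nil, Prod.mk.injEq]
        constructor
        · omega
        · trivial

theorem opt_eq (bits : List Int) (D : Int) (hD : 0 ≤ D) :
    optDist bits D = optAlt bits D := by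
  simp only [optDist, optAlt]
  split_ifs with h0 h1
  · rfl
  · rfl
  · have hDpos : 0 < D := lt_of_le_of_ne hD (Ne.symm h0)
    have hDle : D ≤ (bits.length : Int) := not_lt.mp h1
    set Dn : Nat := D.toNat with hDn
    have hDcast : (Dn : Int) = D := Int.toNat_of_nonneg hD
    set n' : Nat := bits.length with hn'
    set t : Nat := n' - Dn with ht
    have hDnle : Dn ≤ n' := by omega
    have hDnpos : 0 < Dn := by omega
    rw [pref_spec]
    have hT : PySem.List.pyGetD ((List.range (n' + 1)).map (fun i => (bits.take i).sum)) (n' : Int) 0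
        = bits.sum := by
      rw [getS bits n' le_rfl, List.take_length]
    rw [hT]
    rw [PySem.List.pyRange_one 0 ((n' : Int) - D + 1), PySem.List.pyRange_one 0 (n' : Int)]
    have hc1 : (((n' : Int) - D + 1) - 0).toNat = t + 1 := by omega
    have hc2 : ((n' : Int) - 0).toNat = n' := by omega
    rw [hc1, hc2, List.foldl_map, List.foldl_map]
    -- A side: replace prefix lookups by window sums
    have hA : List.foldl
        (fun best (k : Nat) =>
          let ones_in := PySem.List.pyGetD ((List.range (n' + 1)).map (fun i => (bits.take i).sum)) ((0 : Int) + k + D) 0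
            - PySem.List.pyGetD ((List.range (n' + 1)).map (fun i => (bits.take i).sum)) ((0 : Int) + k) 0
          let cost := (D - ones_in) + (bits.sum - ones_in)
          if cost < best then cost else best) (10 ^ 18) (List.range (t + 1))
        = List.foldl
          (fun best s =>
            if D + bits.sum - 2 * ((bits.take (s + Dn)).sum - (bits.take s).sum) < best
            then D + bits.sum - 2 * ((bits.take (s + Dn)).sum - (bits.take s).sum) else best)
          (10 ^ 18) (List.range (t + 1)) := by
      apply PySem.List.foldl_congr_mem
      intro acc k hk
      have hk' : k ≤ t := Nat.le_of_lt_succ (List.mem_range.mp hk)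
      simp only [zero_add]
      have e1 : ((k : Int) + D) = ((k + Dn : Nat) : Int) := by push_cast; omega
      rw [e1, getS bits (k + Dn) (by omega), getS bits k (by omega)]
      split_ifs <;> omega
    rw [hA]
    -- B side: pointwise Int → Nat, then the invariant
    have hB : List.foldl
        (fun (p : Int × Int) (k : Nat) =>
          let win1 := p.1 + PySem.List.pyGetD bits ((0 : Int) + k) 0
          let win := if D ≤ (0 : Int) + k then win1 - PySem.List.pyGetD bits ((0 : Int) + k - D) 0 else win1
          let best :=
            if D ≤ (0 : Int) + k + 1 then
              let cost := D + bits.sum - 2 * win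
              if cost < p.2 then cost else p.2
            else p.2
          (win, best)) (0, 10 ^ 18) (List.range n')
        = List.foldl
          (fun (p : Int × Int) (k : Nat) =>
            let win1 := p.1 + bits.getD k 0
            let win := if Dn ≤ k then win1 - bits.getD (k - Dn) 0 else win1
            let best :=
              if Dn ≤ k + 1 then
                let cost := D + bits.sum - 2 * win
                if cost < p.2 then cost else p.2
              else p.2
            (win, best)) (0, 10 ^ 18) (List.range n') := by
      apply PySem.List.foldl_congr_mem
      intro acc k hk
      simp only [zero_add]
      have hcond1 : (D ≤ (k : Int)) = (Dn ≤ k) := by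
        simp only [eq_iff_iff]; omega
      have hcond2 : (D ≤ (k : Int) + 1) = (Dn ≤ k + 1) := by
        simp only [eq_iff_iff]; omega
      by_cases hkD : Dn ≤ k
      · have e2 : ((k : Int) - D) = ((k - Dn : Nat) : Int) := by push_cast [hkD]; omega
        simp only [hcond1, hcond2, if_pos hkD, e2, PySem.List.pyGetD_natCast]
      · simp only [hcond1, hcond2, if_neg hkD, PySem.List.pyGetD_natCast]
    rw [hB, bfold_inv bits (D + bits.sum) Dn hDnpos n' le_rfl]
    have e6 : n' + 1 - Dn = t + 1 := by omega
    simp only [e6]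

theorem outer_eq (grid : List (List Int)) (col_desc : List Int)
    (hpre : Pre_compute_col_costs grid col_desc) :
    compute_col_costs grid col_desc = compute_col_costs_alt grid col_desc := by
  obtain ⟨hne, hrows, hdesc, hnonneg⟩ := hpre
  simp only [compute_col_costs, compute_col_costs_alt]
  rw [PySem.List.foldl_append_singleton_eq_map, List.nil_append]
  apply List.map_congr_left
  intro j hj
  obtain ⟨hj0, hjY⟩ := PySem.List.mem_pyRange_one.mp hj
  set Y : Nat := (PySem.List.pyGetD grid 0 []).length with hY
  have hYhead : (PySem.List.pyGetD grid 0 []) = grid.headD [] := by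
    cases grid with
    | nil => exact absurd rfl hne
    | cons g gs => rw [PySem.List.pyGetD_zero_cons]; rfl
  set jn : Nat := j.toNat with hjn
  have hjcast : (jn : Int) = j := Int.toNat_of_nonneg hj0
  have hjY' : jn < Y := by omega
  have hcol : (PySem.List.pyRange 0 (grid.length : Int) 1).map
      (fun i => PySem.List.pyGetD (PySem.List.pyGetD grid i []) j 0)
      = grid.map (fun row => PySem.List.pyGetD row j 0) := by
    conv_rhs => rw [← PySem.List.map_pyGetD_pyRange_zero' grid ([] : List Int)]
    rw [List.map_map]
    rfl
  rw [hcol]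
  apply opt_eq
  rw [← hjcast, PySem.List.pyGetD_natCast]
  exact hnonneg jn (by rw [← hYhead]; exact hjY')

-- ===== VERDICT (by name: the statement is the Claim_ definition above) =====
theorem compute_col_costs_spec : Claim_equal_compute_col_costs := by
  intro grid col_desc _ hpre
  unfold Spec_compute_col_costs
  exact outer_eq grid col_desc hpre
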